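-- pv_equiv track=rewrite | github.com/MrBrantCode/unitest_baseline | mut_generate/mist_train_cf/cf_58268/solution.py | classify_elements
-- ===== SOURCE A (Python) =====
-- def classify_elements(lst):
--     small = []  # for elements less than 10
--     medium = []  # for elements between 10 and 20
--     large = []  # for elements more than 20
--
--     for num in lst:
--         if num < 0 or num > 100:  # skip out of range values
--             continue
--         elif num < 10:  # if the number is less than 10
--             if num not in small:  # check for duplicates
--                 small.append(num)
--         elif 10 <= num <= 20:  # if the number is between 10 and 20
--             if num not in medium:  # check for duplicates
--                 medium.append(num)
--         else:  # for number greater than 20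
--             if num not in large:  # check for duplicates
--                 large.append(num)
--
--     return {'small': small, 'medium': medium, 'large': large}
-- ===== SOURCE B (Python) =====
-- def classify_elements(lst):
--     # pass 1: ordered dedup of in-range values
--     seen = set()
--     ordered = []
--     for num in lst:
--         if 0 <= num <= 100 and num not in seen:
--             seen.add(num)
--             ordered.append(num)
--     # pass 2: route each distinct value into its bucket (no membership checks needed)
--     small, medium, large = [], [], []
--     for num in ordered:
--         if num < 10:
--             small.append(num)
--         elif num <= 20:
--             medium.append(num)
--         else:
--             large.append(num)
--     return {'small': small, 'medium': medium, 'large': large}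
-- ===== Notes on version B (the rewrite author's own statement) =====
-- stated objective: alternative
-- what changed: B splits the work into two differently-shaped passes: one ordered-dedup pass over the input using a seen-set, then a classification pass over the distinct values with no per-bucket membership tests, instead of A's single loop with a linear 'num not in bucket' scan inside each branch.
import Mathlib
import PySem

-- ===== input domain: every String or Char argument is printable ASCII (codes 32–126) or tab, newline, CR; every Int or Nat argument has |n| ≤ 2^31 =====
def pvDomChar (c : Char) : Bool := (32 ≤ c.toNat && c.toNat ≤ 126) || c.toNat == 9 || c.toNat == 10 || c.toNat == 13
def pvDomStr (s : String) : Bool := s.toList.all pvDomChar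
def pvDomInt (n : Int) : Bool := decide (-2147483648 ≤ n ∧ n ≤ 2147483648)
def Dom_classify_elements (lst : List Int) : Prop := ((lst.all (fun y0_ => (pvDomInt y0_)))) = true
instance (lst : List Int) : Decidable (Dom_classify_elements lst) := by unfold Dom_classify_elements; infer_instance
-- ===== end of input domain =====

-- B replaces A's single loop (with a linear membership scan inside each bucket branch) by an
-- ordered-dedup pass over a seen-set followed by a check-free classification pass ('alternative').

-- ===== PORT A =====
-- A's single for-loop: state (small, medium, large), skip out-of-range, per-bucket duplicate check.
def classifyLoopA : List Int → List Int → List Int → List Int → List Int × List Int × List Int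
  | [], s, m, l => (s, m, l)
  | num :: rest, s, m, l =>
    if num < 0 ∨ num > 100 then classifyLoopA rest s m l
    else if num < 10 then
      (if num ∈ s then classifyLoopA rest s m l else classifyLoopA rest (s ++ [num]) m l)
    else if 10 ≤ num ∧ num ≤ 20 then
      (if num ∈ m then classifyLoopA rest s m l else classifyLoopA rest s (m ++ [num]) l)
    else
      (if num ∈ l then classifyLoopA rest s m l else classifyLoopA rest s m (l ++ [num]))

def classify_elements (lst : List Int) : List (String × List Int) :=
  let r := classifyLoopA lst [] [] []
  [("small", r.1), ("medium", r.2.1), ("large", r.2.2)]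

-- ===== PORT B =====
-- pass 1: ordered dedup of in-range values (seen-set + ordered list)
def dedupLoopB : List Int → PySem.Set Int → List Int → PySem.Set Int × List Int
  | [], seen, ord => (seen, ord)
  | num :: rest, seen, ord =>
    if 0 ≤ num ∧ num ≤ 100 ∧ num ∉ seen then dedupLoopB rest (PySem.Set.add seen num) (ord ++ [num])
    else dedupLoopB rest seen ord

-- pass 2: route each distinct value into its bucket, no membership checks
def routeLoopB : List Int → List Int → List Int → List Int → List Int × List Int × List Int
  | [], s, m, l => (s, m, l)
  | num :: rest, s, m, l =>
    if num < 10 then routeLoopB rest (s ++ [num]) m l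
    else if num ≤ 20 then routeLoopB rest s (m ++ [num]) l
    else routeLoopB rest s m (l ++ [num])

def classify_elements_alt (lst : List Int) : List (String × List Int) :=
  let ordered := (dedupLoopB lst PySem.Set.empty []).2
  let r := routeLoopB ordered [] [] []
  [("small", r.1), ("medium", r.2.1), ("large", r.2.2)]

-- ===== PRECONDITION & SPEC =====
def Spec_classify_elements (lst : List Int) (out : List (String × List Int)) : Prop := out = classify_elements_alt lst
instance (lst : List Int) (out : List (String × List Int)) : Decidable (Spec_classify_elements lst out) := by unfold Spec_classify_elements; infer_instance

-- ===== CLAIM (what is proved, stated in full; the proofs are below) =====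
def Claim_equal_classify_elements : Prop := ∀ (lst : List Int), Dom_classify_elements lst → Spec_classify_elements lst (classify_elements lst)

-- ===== LEMMAS AND PROOFS =====

-- the dedup accumulator is only ever appended to
lemma dedupLoopB_acc (lst : List Int) (seen : PySem.Set Int) (ord : List Int) :
    (dedupLoopB lst seen ord).2 = ord ++ (dedupLoopB lst seen []).2 := by
  induction lst generalizing seen ord with
  | nil => simp [dedupLoopB]
  | cons num rest ih =>
    by_cases h : 0 ≤ num ∧ num ≤ 100 ∧ num ∉ seen
    · simp only [dedupLoopB, if_pos h]
      rw [ih (PySem.Set.add seen num) (ord ++ [num]), ih (PySem.Set.add seen num) ([] ++ [num]),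
        List.nil_append]
      simp
    · simp only [dedupLoopB, if_neg h]
      exact ih seen ord

-- main invariant: A's interleaved loop equals dedup-then-route, for any consistent state
lemma key (lst : List Int) (seen : PySem.Set Int) (s m l : List Int)
    (hseen : ∀ x, x ∈ seen ↔ x ∈ s ∨ x ∈ m ∨ x ∈ l)
    (hs : ∀ x ∈ s, 0 ≤ x ∧ x < 10)
    (hm : ∀ x ∈ m, 10 ≤ x ∧ x ≤ 20)
    (hl : ∀ x ∈ l, 20 < x ∧ x ≤ 100) :
    classifyLoopA lst s m l = routeLoopB (dedupLoopB lst seen []).2 s m l := by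
  induction lst generalizing seen s m l with
  | nil => simp [classifyLoopA, dedupLoopB, routeLoopB]
  | cons num rest ih =>
    by_cases hr : num < 0 ∨ num > 100
    · -- out of range: both loops skip num
      have hskip : ¬ (0 ≤ num ∧ num ≤ 100 ∧ num ∉ seen) := by
        intro ⟨h1, h2, _⟩; omega
      simp only [classifyLoopA, if_pos hr, dedupLoopB, if_neg hskip]
      exact ih seen s m l hseen hs hm hl
    · by_cases hmem : num ∈ seen
      · -- duplicate: A's bucket check fires, B's dedup skips
        have hskip : ¬ (0 ≤ num ∧ num ≤ 100 ∧ num ∉ seen) := by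
          intro ⟨_, _, h3⟩; exact h3 hmem
        have hb := (hseen num).mp hmem
        simp only [classifyLoopA, if_neg (by omega : ¬ (num < 0 ∨ num > 100)),
          dedupLoopB, if_neg hskip]
        by_cases h10 : num < 10
        · have : num ∈ s := by
            rcases hb with h | h | h
            · exact h
            · exact absurd (hm num h) (by omega)
            · exact absurd (hl num h) (by omega)
          rw [if_pos h10, if_pos this]
          exact ih seen s m l hseen hs hm hl
        · by_cases h20 : 10 ≤ num ∧ num ≤ 20
          · have : num ∈ m := by
              rcases hb with h | h | h
              · exact absurd (hs num h) (by omega)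
              · exact h
              · exact absurd (hl num h) (by omega)
            rw [if_neg h10, if_pos h20, if_pos this]
            exact ih seen s m l hseen hs hm hl
          · have : num ∈ l := by
              rcases hb with h | h | h
              · exact absurd (hs num h) (by omega)
              · exact absurd (hm num h) (by omega)
              · exact h
            rw [if_neg h10, if_neg h20, if_pos this]
            exact ih seen s m l hseen hs hm hl
      · -- new in-range value: A appends to its bucket, B records it and routes it the same way
        have htake : 0 ≤ num ∧ num ≤ 100 ∧ num ∉ seen := ⟨by omega, by omega, hmem⟩
        have hnb : num ∉ s ∧ num ∉ m ∧ num ∉ l := by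
          constructor
          · intro h; exact hmem ((hseen num).mpr (Or.inl h))
          constructor
          · intro h; exact hmem ((hseen num).mpr (Or.inr (Or.inl h)))
          · intro h; exact hmem ((hseen num).mpr (Or.inr (Or.inr h)))
        simp only [classifyLoopA, if_neg (by omega : ¬ (num < 0 ∨ num > 100)),
          dedupLoopB, if_pos htake]
        rw [dedupLoopB_acc rest (PySem.Set.add seen num) ([] ++ [num]), List.nil_append]
        by_cases h10 : num < 10
        · rw [if_pos h10, if_neg hnb.1]
          simp only [List.singleton_append, routeLoopB, if_pos h10]
          refine ih (PySem.Set.add seen num) (s ++ [num]) m l ?_ ?_ hm hl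
          · intro x
            rw [PySem.Set.mem_add]
            simp only [List.mem_append, List.mem_singleton]
            constructor
            · rintro (h | h)
              · rcases (hseen x).mp h with h | h | h
                · exact Or.inl (Or.inl h)
                · exact Or.inr (Or.inl h)
                · exact Or.inr (Or.inr h)
              · exact Or.inl (Or.inr h)
            · rintro ((h | h) | h | h)
              · exact Or.inl ((hseen x).mpr (Or.inl h))
              · exact Or.inr h
              · exact Or.inl ((hseen x).mpr (Or.inr (Or.inl h)))
              · exact Or.inl ((hseen x).mpr (Or.inr (Or.inr h)))
          · intro x hx
            rcases List.mem_append.mp hx with h | h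
            · exact hs x h
            · simp at h; subst h; omega
        · by_cases h20 : 10 ≤ num ∧ num ≤ 20
          · rw [if_neg h10, if_pos h20, if_neg hnb.2.1]
            simp only [List.singleton_append, routeLoopB, if_neg h10, if_pos (by omega : num ≤ 20)]
            refine ih (PySem.Set.add seen num) s (m ++ [num]) l ?_ hs ?_ hl
            · intro x
              rw [PySem.Set.mem_add]
              simp only [List.mem_append, List.mem_singleton]
              constructor
              · rintro (h | h)
                · rcases (hseen x).mp h with h | h | h
                  · exact Or.inl h
                  · exact Or.inr (Or.inl (Or.inl h))
                  · exact Or.inr (Or.inr h)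
                · exact Or.inr (Or.inl (Or.inr h))
              · rintro (h | (h | h) | h)
                · exact Or.inl ((hseen x).mpr (Or.inl h))
                · exact Or.inl ((hseen x).mpr (Or.inr (Or.inl h)))
                · exact Or.inr h
                · exact Or.inl ((hseen x).mpr (Or.inr (Or.inr h)))
            · intro x hx
              rcases List.mem_append.mp hx with h | h
              · exact hm x h
              · simp at h; subst h; omega
          · rw [if_neg h10, if_neg h20, if_neg hnb.2.2]
            simp only [List.singleton_append, routeLoopB, if_neg h10, if_neg (by omega : ¬ num ≤ 20)]
            refine ih (PySem.Set.add seen num) s m (l ++ [num]) ?_ hs hm ?_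
            · intro x
              rw [PySem.Set.mem_add]
              simp only [List.mem_append, List.mem_singleton]
              constructor
              · rintro (h | h)
                · rcases (hseen x).mp h with h | h | h
                  · exact Or.inl h
                  · exact Or.inr (Or.inl h)
                  · exact Or.inr (Or.inr (Or.inl h))
                · exact Or.inr (Or.inr (Or.inr h))
              · rintro (h | h | h | h)
                · exact Or.inl ((hseen x).mpr (Or.inl h))
                · exact Or.inl ((hseen x).mpr (Or.inr (Or.inl h)))
                · exact Or.inl ((hseen x).mpr (Or.inr (Or.inr h)))
                · exact Or.inr h
            · intro x hx
              rcases List.mem_append.mp hx with h | h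
              · exact hl x h
              · simp at h; subst h; omega

-- ===== VERDICT (by name: the statement is the Claim_ definition above) =====
theorem classify_elements_spec : Claim_equal_classify_elements := by
  intro lst _
  show classify_elements lst = classify_elements_alt lst
  unfold classify_elements classify_elements_alt
  rw [key lst PySem.Set.empty [] [] [] (by simp [PySem.Set.empty]) (by simp) (by simp) (by simp)]
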